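-- pv_equiv track=rewrite | github.com/pradyun1611/curve-digitisation | core/intersection_resolver.py | _stitch_segment
-- ===== SOURCE A (Python) =====
-- from typing import Any, Dict, List, Optional, Tuple
--
-- def _stitch_segment(
--     full_path: List[Tuple[int, int]],
--     new_segment: List[Tuple[int, int]],
--     zone_x_start: int,
--     zone_x_end: int,
-- ) -> List[Tuple[int, int]]:
--     """Replace the portion of *full_path* inside [zone_x_start, zone_x_end]
--     with *new_segment*, preserving points outside the zone."""
--     # Keep points before the zone
--     left = [(px, py) for px, py in full_path if px < zone_x_start]
--     # Keep points after the zone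
--     right = [(px, py) for px, py in full_path if px > zone_x_end]
--
--     # Sort segments by x
--     left.sort(key=lambda p: p[0])
--     new_segment_sorted = sorted(new_segment, key=lambda p: p[0])
--     right.sort(key=lambda p: p[0])
--
--     result = left + new_segment_sorted + right
--     return result
-- ===== SOURCE B (Python) =====
-- def _stitch_segment(full_path, new_segment, zone_x_start, zone_x_end):
--     # Sort the whole path by x once, then locate the zone boundaries by
--     # scanning from each end and splice the sorted new segment in between.
--     sp = sorted(full_path, key=lambda p: p[0])
--     i = 0
--     for px, _ in sp:
--         if px >= zone_x_start:
--             break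
--         i += 1
--     j = len(sp)
--     for px, _ in reversed(sp):
--         if px <= zone_x_end:
--             break
--         j -= 1
--     return sp[:i] + sorted(new_segment, key=lambda p: p[0]) + sp[j:]
-- ===== Notes on version B (the rewrite author's own statement) =====
-- stated objective: alternative
-- what changed: B sorts the whole path once and finds the zone boundaries by two linear scans from the ends of the sorted list, slicing it there, instead of A's two filter comprehensions each followed by its own sort.
import Mathlib
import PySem

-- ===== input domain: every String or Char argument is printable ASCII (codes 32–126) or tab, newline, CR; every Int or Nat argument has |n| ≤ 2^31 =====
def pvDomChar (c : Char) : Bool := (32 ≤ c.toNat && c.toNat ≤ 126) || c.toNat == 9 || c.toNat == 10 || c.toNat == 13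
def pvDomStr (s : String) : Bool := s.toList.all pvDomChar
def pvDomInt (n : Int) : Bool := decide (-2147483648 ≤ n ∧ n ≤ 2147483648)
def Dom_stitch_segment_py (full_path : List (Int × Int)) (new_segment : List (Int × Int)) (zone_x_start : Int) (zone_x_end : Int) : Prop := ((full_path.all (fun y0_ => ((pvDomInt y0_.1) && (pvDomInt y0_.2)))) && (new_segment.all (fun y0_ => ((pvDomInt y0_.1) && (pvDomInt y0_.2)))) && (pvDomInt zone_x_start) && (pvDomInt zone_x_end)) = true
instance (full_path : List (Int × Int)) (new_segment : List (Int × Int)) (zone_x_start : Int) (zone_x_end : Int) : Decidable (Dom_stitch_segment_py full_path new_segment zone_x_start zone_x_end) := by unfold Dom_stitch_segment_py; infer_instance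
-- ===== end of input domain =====

-- B replaces A's two filter-comprehensions + three sorts by one global sort, two
-- linear boundary scans and slicing (objective: alternative decomposition, same cost).

-- ===== PORT A =====
def stitch_segment_py (full_path : List (Int × Int)) (new_segment : List (Int × Int)) (zone_x_start : Int) (zone_x_end : Int) : List (Int × Int) :=
  -- left = [(px, py) for px, py in full_path if px < zone_x_start]
  let left := full_path.filter (fun q => decide (q.1 < zone_x_start))
  -- right = [(px, py) for px, py in full_path if px > zone_x_end]
  let right := full_path.filter (fun q => decide (q.1 > zone_x_end))
  -- left.sort(key=lambda p: p[0]); sorted(new_segment, key=...); right.sort(key=...)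
  let leftS := PySem.List.sorted left (fun q => q.1)
  let segS := PySem.List.sorted new_segment (fun q => q.1)
  let rightS := PySem.List.sorted right (fun q => q.1)
  leftS ++ segS ++ rightS

-- ===== PORT B =====
-- 'for px, _ in sp: if px >= zone_x_start: break; i += 1' — counts the prefix with px < start
def pvScanLt : List (Int × Int) → Int → Nat
  | [], _ => 0
  | q :: t, s => if q.1 < s then pvScanLt t s + 1 else 0

-- 'for px, _ in reversed(sp): if px <= zone_x_end: break; j -= 1' — counts the reversed prefix with px > end
def pvScanGt : List (Int × Int) → Int → Nat
  | [], _ => 0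
  | q :: t, e => if e < q.1 then pvScanGt t e + 1 else 0

def stitch_segment_py_alt (full_path : List (Int × Int)) (new_segment : List (Int × Int)) (zone_x_start : Int) (zone_x_end : Int) : List (Int × Int) :=
  let sp := PySem.List.sorted full_path (fun q => q.1)
  let i := pvScanLt sp zone_x_start
  let j := sp.length - pvScanGt sp.reverse zone_x_end
  -- sp[:i] and sp[j:] with 0 ≤ i, j: exactly List.take / List.drop
  sp.take i ++ PySem.List.sorted new_segment (fun q => q.1) ++ sp.drop j

-- ===== PRECONDITION & SPEC =====
def Spec_stitch_segment_py (full_path : List (Int × Int)) (new_segment : List (Int × Int)) (zone_x_start : Int) (zone_x_end : Int) (out : List (Int × Int)) : Prop := out = stitch_segment_py_alt full_path new_segment zone_x_start zone_x_end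
instance (full_path : List (Int × Int)) (new_segment : List (Int × Int)) (zone_x_start : Int) (zone_x_end : Int) (out : List (Int × Int)) : Decidable (Spec_stitch_segment_py full_path new_segment zone_x_start zone_x_end out) := by unfold Spec_stitch_segment_py; infer_instance

-- ===== CLAIM (what is proved, stated in full; the proofs are below) =====
def Claim_equal_stitch_segment_py : Prop := ∀ (full_path : List (Int × Int)) (new_segment : List (Int × Int)) (zone_x_start : Int) (zone_x_end : Int), Dom_stitch_segment_py full_path new_segment zone_x_start zone_x_end → Spec_stitch_segment_py full_path new_segment zone_x_start zone_x_end (stitch_segment_py full_path new_segment zone_x_start zone_x_end)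

-- ===== LEMMAS AND PROOFS =====

-- insertion keeps the ≤-by-key ordering
lemma pairwise_insertBy (key : (Int × Int) → Int) (x : Int × Int) (ys : List (Int × Int))
    (h : ys.Pairwise (fun a b => key a ≤ key b)) :
    (PySem.List.insertBy (fun a b => decide (key a < key b)) x ys).Pairwise (fun a b => key a ≤ key b) := by
  induction ys with
  | nil => simp [PySem.List.insertBy]
  | cons y t ih =>
    rcases List.pairwise_cons.mp h with ⟨hy, ht⟩
    by_cases hxy : key x < key y
    · simp only [PySem.List.insertBy, hxy, decide_true, if_true]
      refine List.pairwise_cons.mpr ⟨?_, h⟩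
      intro z hz
      rcases List.mem_cons.mp hz with rfl | hzt
      · exact le_of_lt hxy
      · exact le_trans (le_of_lt hxy) (hy z hzt)
    · simp only [PySem.List.insertBy, hxy, decide_false, if_false]
      refine List.pairwise_cons.mpr ⟨?_, ih ht⟩
      intro z hz
      rcases (PySem.List.mem_insertBy (fun a b => decide (key a < key b)) x z t).mp hz with rfl | hzt
      · exact le_of_not_gt hxy
      · exact hy z hzt

-- filtering commutes with inserting into a sorted list
lemma filter_insertBy (key : (Int × Int) → Int) (p : (Int × Int) → Bool) (x : Int × Int)
    (ys : List (Int × Int)) (h : ys.Pairwise (fun a b => key a ≤ key b)) :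
    (PySem.List.insertBy (fun a b => decide (key a < key b)) x ys).filter p =
      if p x then PySem.List.insertBy (fun a b => decide (key a < key b)) x (ys.filter p)
      else ys.filter p := by
  induction ys with
  | nil => by_cases hp : p x <;> simp [PySem.List.insertBy, hp]
  | cons y t ih =>
    rcases List.pairwise_cons.mp h with ⟨hy, ht⟩
    have hfront : ∀ l : List (Int × Int), (∀ z ∈ l, key x < key z) →
        PySem.List.insertBy (fun a b => decide (key a < key b)) x l = x :: l := by
      intro l hl
      cases l with
      | nil => simp [PySem.List.insertBy]
      | cons a s => simp [PySem.List.insertBy, hl a (by simp)]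
    by_cases hxy : key x < key y
    · simp only [PySem.List.insertBy, hxy, decide_true, if_true]
      by_cases hp : p x
      · by_cases hpy : p y
        · simp [List.filter_cons, hp, hpy, PySem.List.insertBy, hxy]
        · have hf := hfront (t.filter p)
            (fun z hz => lt_of_lt_of_le hxy (hy z (List.mem_of_mem_filter hz)))
          simp [List.filter_cons, hp, hpy, hf]
      · by_cases hpy : p y <;> simp [List.filter_cons, hp, hpy]
    · simp only [PySem.List.insertBy, hxy, decide_false]
      by_cases hpy : p y
      · by_cases hp : p x <;>
          simp [List.filter_cons, hpy, ih ht, hp, PySem.List.insertBy, hxy]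
      · by_cases hp : p x <;> simp [List.filter_cons, hpy, ih ht, hp]

-- stable sort commutes with filter
lemma filter_sorted (xs : List (Int × Int)) (key : (Int × Int) → Int) (p : (Int × Int) → Bool) :
    (PySem.List.sorted xs key false).filter p = PySem.List.sorted (xs.filter p) key false := by
  rw [PySem.List.sorted_eq_foldl_insertBy, PySem.List.sorted_eq_foldl_insertBy]
  have main : ∀ (l : List (Int × Int)) (acc : List (Int × Int)),
      acc.Pairwise (fun a b => key a ≤ key b) →
      (l.foldl (fun acc x => PySem.List.insertBy (fun a b => decide (key a < key b)) x acc) acc).filter p =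
        (l.filter p).foldl (fun acc x => PySem.List.insertBy (fun a b => decide (key a < key b)) x acc) (acc.filter p) := by
    intro l
    induction l with
    | nil => intro acc _; simp
    | cons x t ih =>
      intro acc hacc
      simp only [List.foldl_cons, List.filter_cons]
      rw [ih _ (pairwise_insertBy key x acc hacc), filter_insertBy key p x acc hacc]
      by_cases hp : p x <;> simp [hp]
  simpa using main xs [] (by simp)

-- the left boundary scan cuts exactly the filter on a sorted list
lemma take_scanLt (l : List (Int × Int)) (s : Int) (h : l.Pairwise (fun a b => a.1 ≤ b.1)) :
    l.take (pvScanLt l s) = l.filter (fun q => decide (q.1 < s)) := by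
  induction l with
  | nil => simp [pvScanLt]
  | cons q t ih =>
    rcases List.pairwise_cons.mp h with ⟨hq, ht⟩
    by_cases hlt : q.1 < s
    · simp [pvScanLt, hlt, List.filter_cons, ih ht]
    · simp only [pvScanLt, hlt, if_false, List.take_zero, List.filter_cons,
        decide_eq_true_eq, hlt, if_false]
      symm
      rw [List.filter_eq_nil_iff]
      intro z hz
      simp only [decide_eq_true_eq]
      intro hzs
      exact hlt (lt_of_le_of_lt (hq z hz) hzs)

-- the right boundary scan (on the reversed list) cuts exactly the filter
lemma take_scanGt (l : List (Int × Int)) (e : Int) (h : l.Pairwise (fun a b => b.1 ≤ a.1)) :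
    l.take (pvScanGt l e) = l.filter (fun q => decide (e < q.1)) := by
  induction l with
  | nil => simp [pvScanGt]
  | cons q t ih =>
    rcases List.pairwise_cons.mp h with ⟨hq, ht⟩
    by_cases hgt : e < q.1
    · simp [pvScanGt, hgt, List.filter_cons, ih ht]
    · simp only [pvScanGt, hgt, if_false, List.take_zero, List.filter_cons,
        decide_eq_true_eq, hgt, if_false]
      symm
      rw [List.filter_eq_nil_iff]
      intro z hz
      simp only [decide_eq_true_eq]
      intro hze
      exact hgt (lt_of_lt_of_le hze (hq z hz))

lemma drop_scanGt (l : List (Int × Int)) (e : Int) (h : l.Pairwise (fun a b => a.1 ≤ b.1)) :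
    l.drop (l.length - pvScanGt l.reverse e) = l.filter (fun q => decide (e < q.1)) := by
  have hk : pvScanGt l.reverse e ≤ l.length := by
    have : ∀ (m : List (Int × Int)), pvScanGt m e ≤ m.length := by
      intro m; induction m with
      | nil => simp [pvScanGt]
      | cons q t ih => by_cases hgt : e < q.1 <;> simp [pvScanGt, hgt] <;> omega
    simpa using this l.reverse
  have hrev : l.reverse.Pairwise (fun a b => b.1 ≤ a.1) := by
    rw [List.pairwise_reverse]; exact h
  have htake := take_scanGt l.reverse e hrev
  have hdrop : l.drop (l.length - pvScanGt l.reverse e) = (l.reverse.take (pvScanGt l.reverse e)).reverse := by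
    rw [List.reverse_take]; simp
  rw [hdrop, htake, List.filter_reverse, List.reverse_reverse]

-- ===== VERDICT (by name: the statement is the Claim_ definition above) =====
theorem stitch_segment_py_spec : Claim_equal_stitch_segment_py := by
  intro full_path new_segment zone_x_start zone_x_end _
  show _ = _
  unfold stitch_segment_py stitch_segment_py_alt
  simp only []
  have hp : (PySem.List.sorted full_path (fun q => q.1) false).Pairwise (fun a b => a.1 ≤ b.1) :=
    PySem.List.sorted_pairwise full_path (fun q => q.1)
  rw [take_scanLt _ zone_x_start hp, drop_scanGt _ zone_x_end hp,
    filter_sorted, filter_sorted]
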